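-- pv_equiv track=rewrite | github.com/kshitij41/Goodrich-tamassia-python-1 | chapter 5 Array-based sequences.py | _transform
-- ===== SOURCE A (Python) =====
-- def _transform(original,code):
--     msg = list(original)
--     for k in range(len(msg)):
--         if msg[k].isupper():
--             j = ord(msg[k])-ord('A')
--             msg[k] = code[j][0]
--         elif msg[k].islower():
--             j = ord(msg[k])-ord('a')
--             msg[k] = code[j][1]
--
--     return ''.join(msg)
-- ===== SOURCE B (Python) =====
-- def _transform(original, code):
--     out = list(original)
--     for j in range(26):
--         U = chr(ord('A') + j)
--         L = chr(ord('a') + j)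
--         for k, ch in enumerate(original):
--             if ch == U:
--                 out[k] = code[j][0]
--             elif ch == L:
--                 out[k] = code[j][1]
--     return ''.join(out)
-- ===== Notes on version B (the rewrite author's own statement) =====
-- stated objective: alternative
-- what changed: A makes one character-major pass, classifying each character with isupper/islower and indexing code by ord arithmetic; B is letter-major: 26 scatter passes, one per alphabet position j, each scanning the string and overwriting the positions holding that letter with code[j][0]/code[j][1] (order of passes is irrelevant since each position is written in at most one pass).
import Mathlib
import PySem

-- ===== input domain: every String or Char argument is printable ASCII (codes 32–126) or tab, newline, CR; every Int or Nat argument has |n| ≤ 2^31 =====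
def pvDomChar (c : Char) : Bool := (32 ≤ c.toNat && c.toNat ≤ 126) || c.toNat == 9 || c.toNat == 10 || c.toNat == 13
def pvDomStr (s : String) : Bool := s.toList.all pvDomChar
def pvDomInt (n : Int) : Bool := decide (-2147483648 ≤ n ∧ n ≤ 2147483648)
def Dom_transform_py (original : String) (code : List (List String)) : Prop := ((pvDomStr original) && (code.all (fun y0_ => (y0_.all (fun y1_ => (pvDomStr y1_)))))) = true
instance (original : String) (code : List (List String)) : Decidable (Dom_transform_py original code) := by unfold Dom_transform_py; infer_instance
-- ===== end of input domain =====

-- B replaces A's single character-major pass (isupper/islower classification per character)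
-- by 26 letter-major scatter passes, one per alphabet position, each overwriting the
-- occurrences of that letter (objective: alternative; each position is written at most once,
-- so the pass order does not matter).

-- ===== PORT A =====
-- ord(s) for the 1-char strings A applies it to (exact there; A never calls ord on other strings)
def pyOrd (s : String) : Int := ((s.toList.headD ' ').toNat : Int)
-- s.isupper() / s.islower() for 1-char strings (exact there; A only tests the 1-char list elements)
def pyIsU (s : String) : Bool := match s.toList with | [c] => PySem.Chars.isupper c | _ => false
def pyIsL (s : String) : Bool := match s.toList with | [c] => PySem.Chars.islower c | _ => false

-- the body of A's for-loop (msg[k] read, branch, msg[k] write)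
def aStep (code : List (List String)) (m : List String) (k : Int) : List String :=
  let s := PySem.List.pyGetD m k ""
  if pyIsU s then
    PySem.List.pySetD m k (PySem.List.pyGetD (PySem.List.pyGetD code (pyOrd s - 65) []) 0 "")
  else if pyIsL s then
    PySem.List.pySetD m k (PySem.List.pyGetD (PySem.List.pyGetD code (pyOrd s - 97) []) 1 "")
  else m

def transform_py (original : String) (code : List (List String)) : String :=
  PySem.Str.join ""
    ((PySem.List.pyRange 0 (((original.toList.map (fun c => String.ofList [c])).length : Int))).foldl
      (aStep code) (original.toList.map (fun c => String.ofList [c])))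

-- ===== PORT B =====
-- the body of B's inner loop: one enumerate step of pass j (U = chr(65+j), L = chr(97+j))
def bStep (code : List (List String)) (j : Int) (U L : Char) (o : List String) (p : Int × Char) : List String :=
  if p.2 = U then PySem.List.pySetD o p.1 (PySem.List.pyGetD (PySem.List.pyGetD code j []) 0 "")
  else if p.2 = L then PySem.List.pySetD o p.1 (PySem.List.pyGetD (PySem.List.pyGetD code j []) 1 "")
  else o

-- one full pass of B for alphabet position j: scan enumerate(original), scatter code[j]
def bPass (orig : List Char) (code : List (List String)) (out : List String) (j : Int) : List String :=
  (PySem.List.enumerate orig).foldl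
    (bStep code j (Char.ofNat ((65 + j).toNat)) (Char.ofNat ((97 + j).toNat))) out

def transform_py_alt (original : String) (code : List (List String)) : String :=
  PySem.Str.join ""
    ((PySem.List.pyRange 0 26).foldl (bPass original.toList code)
      (original.toList.map (fun c => String.ofList [c])))

-- ===== PRECONDITION & SPEC =====
-- Pre_ excludes exactly the inputs on which the Pythons raise IndexError: an uppercase letter
-- whose row code[ord(ch)-65] is missing or empty, or a lowercase letter whose row has < 2 entries.
def Pre_transform_py (original : String) (code : List (List String)) : Prop :=
  (original.toList.all (fun c =>
    ((!(decide (65 ≤ c.toNat)) || !(decide (c.toNat ≤ 90))) ||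
      (decide (c.toNat - 65 < code.length) && decide (1 ≤ (code.getD (c.toNat - 65) []).length))) &&
    ((!(decide (97 ≤ c.toNat)) || !(decide (c.toNat ≤ 122))) ||
      (decide (c.toNat - 97 < code.length) && decide (2 ≤ (code.getD (c.toNat - 97) []).length))))) = true
instance (original : String) (code : List (List String)) : Decidable (Pre_transform_py original code) := by
  unfold Pre_transform_py; infer_instance

def pvWitness_transform_py : String × List (List String) := ("Ab!", [["X"], ["y", "z"]])

def Spec_transform_py (original : String) (code : List (List String)) (out : String) : Prop := out = transform_py_alt original code
instance (original : String) (code : List (List String)) (out : String) : Decidable (Spec_transform_py original code out) := by unfold Spec_transform_py; infer_instance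

-- ===== CLAIM (what is proved, stated in full; the proofs are below) =====
def Claim_equal_transform_py : Prop := ∀ (original : String) (code : List (List String)), Dom_transform_py original code → Pre_transform_py original code → Spec_transform_py original code (transform_py original code)

-- ===== LEMMAS AND PROOFS =====

lemma char_toNat_ofNat (n : ℕ) (h : n ≤ 200) : (Char.ofNat n).toNat = n := by
  rw [Char.toNat_ofNat, if_pos]; exact Or.inl (by omega)

lemma isupper_bounds (c : Char) (h : PySem.Chars.isupper c = true) :
    65 ≤ c.toNat ∧ c.toNat ≤ 90 := by
  simp [PySem.Chars.isupper, Char.le_def] at h; exact ⟨h.1, h.2⟩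

lemma islower_bounds (c : Char) (h : PySem.Chars.islower c = true) :
    97 ≤ c.toNat ∧ c.toNat ≤ 122 := by
  simp [PySem.Chars.islower, Char.le_def] at h; exact ⟨h.1, h.2⟩

lemma isupper_iff (c : Char) : PySem.Chars.isupper c = true ↔ 65 ≤ c.toNat ∧ c.toNat ≤ 90 := by
  constructor
  · exact isupper_bounds c
  · intro ⟨h1, h2⟩
    have hA : 'A'.val.toNat = 65 := rfl
    have hZ : 'Z'.val.toNat = 90 := rfl
    have hv : c.val.toNat = c.toNat := rfl
    simp only [PySem.Chars.isupper, Char.le_def, UInt32.le_iff_toNat_le, Bool.and_eq_true,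
      decide_eq_true_eq]
    omega

lemma islower_iff (c : Char) : PySem.Chars.islower c = true ↔ 97 ≤ c.toNat ∧ c.toNat ≤ 122 := by
  constructor
  · exact islower_bounds c
  · intro ⟨h1, h2⟩
    have ha : 'a'.val.toNat = 97 := rfl
    have hz : 'z'.val.toNat = 122 := rfl
    have hv : c.val.toNat = c.toNat := rfl
    simp only [PySem.Chars.islower, Char.le_def, UInt32.le_iff_toNat_le, Bool.and_eq_true,
      decide_eq_true_eq]
    omega

-- what A does to one 1-char element of msg
def gS (code : List (List String)) (s : String) : String :=
  if pyIsU s then PySem.List.pyGetD (PySem.List.pyGetD code (pyOrd s - 65) []) 0 ""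
  else if pyIsL s then PySem.List.pyGetD (PySem.List.pyGetD code (pyOrd s - 97) []) 1 ""
  else s

lemma pyGetD_append_cons (pre : List String) (x : String) (xs : List String) :
    PySem.List.pyGetD (pre ++ x :: xs) (pre.length : Int) "" = x := by
  rw [PySem.List.pyGetD_natCast]; simp

lemma pySetD_append_cons (pre : List String) (x v : String) (xs : List String) :
    PySem.List.pySetD (pre ++ x :: xs) (pre.length : Int) v = pre ++ v :: xs := by
  simp [PySem.List.pySetD, PySem.List.pySet?, PySem.List.pyIdx?]

lemma aStep_append_cons (code : List (List String)) (pre : List String) (x : String) (xs : List String) :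
    aStep code (pre ++ x :: xs) (pre.length : Int) = pre ++ gS code x :: xs := by
  unfold aStep gS
  rw [pyGetD_append_cons]
  by_cases h1 : pyIsU x <;> by_cases h2 : pyIsL x <;>
    simp [h1, h2]

lemma fold_eq (code : List (List String)) :
    ∀ (post pre : List String),
      (PySem.List.pyRange (pre.length : Int) ((pre.length : Int) + (post.length : Int))).foldl
        (aStep code) (pre ++ post) = pre ++ post.map (gS code) := by
  intro post
  induction post with
  | nil => intro pre; rw [PySem.List.pyRange_one_eq_nil (by simp)]; simp
  | cons x xs ih =>
    intro pre
    rw [PySem.List.pyRange_one_cons (by push_cast [List.length_cons]; omega)]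
    simp only [List.foldl_cons, aStep_append_cons]
    have hl : (pre.length : Int) + 1 = ((pre ++ [gS code x]).length : Int) := by simp
    have hr : (pre.length : Int) + ((x :: xs).length : Int)
        = ((pre ++ [gS code x]).length : Int) + (xs.length : Int) := by simp; ring
    have hlist : pre ++ gS code x :: xs = (pre ++ [gS code x]) ++ xs := by simp
    rw [hlist, hr, hl, ih (pre ++ [gS code x])]
    simp

lemma transformA_eq (original : String) (code : List (List String)) :
    transform_py original code
      = PySem.Str.join "" (original.toList.map (fun c => gS code (String.ofList [c]))) := by
  unfold transform_py
  have h := fold_eq code (original.toList.map (fun c => String.ofList [c])) []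
  simp only [List.length_nil, Nat.cast_zero, zero_add, List.nil_append] at h
  rw [h, List.map_map]
  rfl

-- ---- B-side lemmas ----

-- what one pass j does to the single position holding character c
def hStep (code : List (List String)) (c : Char) (o : String) (j : Int) : String :=
  if c = Char.ofNat ((65 + j).toNat) then PySem.List.pyGetD (PySem.List.pyGetD code j []) 0 ""
  else if c = Char.ofNat ((97 + j).toNat) then PySem.List.pyGetD (PySem.List.pyGetD code j []) 1 ""
  else o

-- one pass = a zipWith over (original chars, current out) pointwise
lemma pass_zip (code : List (List String)) (j : Int) (U L : Char) :
    ∀ (xs : List Char) (pre rest : List String), rest.length = xs.length →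
      (PySem.List.enumerate xs (pre.length : Int)).foldl (bStep code j U L) (pre ++ rest)
        = pre ++ List.zipWith (fun c o =>
            if c = U then PySem.List.pyGetD (PySem.List.pyGetD code j []) 0 ""
            else if c = L then PySem.List.pyGetD (PySem.List.pyGetD code j []) 1 ""
            else o) xs rest := by
  intro xs
  induction xs with
  | nil =>
    intro pre rest h
    rw [List.length_eq_zero_iff.mp h]
    simp [PySem.List.enumerate_nil]
  | cons x xs ih =>
    intro pre rest h
    cases rest with
    | nil => simp at h
    | cons r rs =>
      simp only [List.length_cons] at h
      rw [PySem.List.enumerate_cons, List.foldl_cons]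
      have hstep : bStep code j U L (pre ++ r :: rs) ((pre.length : Int), x)
          = pre ++ (if x = U then PySem.List.pyGetD (PySem.List.pyGetD code j []) 0 ""
              else if x = L then PySem.List.pyGetD (PySem.List.pyGetD code j []) 1 ""
              else r) :: rs := by
        unfold bStep
        by_cases h1 : x = U
        · rw [if_pos h1, pySetD_append_cons, if_pos h1]
        · rw [if_neg h1]
          by_cases h2 : x = L
          · rw [if_pos h2, pySetD_append_cons, if_neg h1, if_pos h2]
          · rw [if_neg h2, if_neg h1, if_neg h2]
      rw [hstep]
      set v := if x = U then PySem.List.pyGetD (PySem.List.pyGetD code j []) 0 ""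
          else if x = L then PySem.List.pyGetD (PySem.List.pyGetD code j []) 1 "" else r with hv
      have hl : (pre.length : Int) + 1 = ((pre ++ [v]).length : Int) := by simp
      have hlist : pre ++ v :: rs = (pre ++ [v]) ++ rs := by simp
      rw [hlist, hl, ih (pre ++ [v]) rs (by omega)]
      simp [hv]

lemma zipWith_snd_of_length {α β : Type} (f : α → β → β) :
    ∀ (xs : List α) (ys : List β), ys.length = xs.length →
      (∀ x y, f x y = y) → List.zipWith f xs ys = ys := by
  intro xs
  induction xs with
  | nil => intro ys h _; rw [List.length_eq_zero_iff.mp h]; simp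
  | cons x xs ih =>
    intro ys h hf
    cases ys with
    | nil => simp at h
    | cons y ys =>
      simp only [List.length_cons] at h
      simp [List.zipWith, hf, ih ys (by omega) hf]

lemma zipWith_zipWith_same {α β : Type} (f g : α → β → β) :
    ∀ (xs : List α) (ys : List β),
      List.zipWith f xs (List.zipWith g xs ys) = List.zipWith (fun c o => f c (g c o)) xs ys := by
  intro xs
  induction xs with
  | nil => intro ys; simp
  | cons x xs ih =>
    intro ys
    cases ys with
    | nil => simp
    | cons y ys => simp [List.zipWith, ih]

-- folding pointwise passes = pointwise folding
lemma foldl_zip (code : List (List String)) :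
    ∀ (js : List Int) (xs : List Char) (out : List String), out.length = xs.length →
      js.foldl (fun o j => List.zipWith (fun c o' =>
          if c = Char.ofNat ((65 + j).toNat) then PySem.List.pyGetD (PySem.List.pyGetD code j []) 0 ""
          else if c = Char.ofNat ((97 + j).toNat) then PySem.List.pyGetD (PySem.List.pyGetD code j []) 1 ""
          else o') xs o) out
        = List.zipWith (fun c o => js.foldl (hStep code c) o) xs out := by
  intro js
  induction js with
  | nil =>
    intro xs out h
    simp only [List.foldl_nil]
    exact (zipWith_snd_of_length _ xs out h (fun _ _ => rfl)).symm
  | cons j js ih =>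
    intro xs out h
    simp only [List.foldl_cons]
    rw [ih xs _ (by rw [List.length_zipWith]; omega), zipWith_zipWith_same]
    rfl

lemma foldl_hStep_id (code : List (List String)) (c : Char) :
    ∀ (js : List Int), (∀ j ∈ js, ∀ o, hStep code c o j = o) →
      ∀ o, js.foldl (hStep code c) o = o := by
  intro js
  induction js with
  | nil => intro _ o; rfl
  | cons j js ih =>
    intro h o
    simp only [List.foldl_cons]
    rw [h j (by simp), ih (fun j' hj' => h j' (by simp [hj']))]

-- a pass with j ≠ the position of c (or c not a letter) leaves c's slot alone
lemma hStep_id (code : List (List String)) (c : Char) (j : Int) (h0 : 0 ≤ j) (h26 : j < 26)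
    (hU : ¬ (65 ≤ c.toNat ∧ c.toNat = 65 + j.toNat))
    (hL : ¬ (97 ≤ c.toNat ∧ c.toNat = 97 + j.toNat)) (o : String) :
    hStep code c o j = o := by
  unfold hStep
  rw [if_neg, if_neg]
  · intro hc
    apply hL
    have := congrArg Char.toNat hc
    rw [char_toNat_ofNat _ (by omega)] at this
    omega
  · intro hc
    apply hU
    have := congrArg Char.toNat hc
    rw [char_toNat_ofNat _ (by omega)] at this
    omega

lemma pointwise (code : List (List String)) (c : Char) :
    (PySem.List.pyRange 0 26).foldl (hStep code c) (String.ofList [c]) = gS code (String.ofList [c]) := by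
  have hgS : gS code (String.ofList [c])
      = if PySem.Chars.isupper c then
          PySem.List.pyGetD (PySem.List.pyGetD code ((c.toNat : Int) - 65) []) 0 ""
        else if PySem.Chars.islower c then
          PySem.List.pyGetD (PySem.List.pyGetD code ((c.toNat : Int) - 97) []) 1 ""
        else String.ofList [c] := by
    simp [gS, pyIsU, pyIsL, pyOrd]
  by_cases hU : PySem.Chars.isupper c = true
  · obtain ⟨h1, h2⟩ := isupper_bounds c hU
    set j0 : Int := (c.toNat : Int) - 65 with hj0
    have hjb : 0 ≤ j0 ∧ j0 < 26 := by omega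
    rw [PySem.List.pyRange_one_append 0 j0 26 (by omega) (by omega),
        PySem.List.pyRange_one_cons (show j0 < 26 by omega), List.foldl_append,
        foldl_hStep_id code c (PySem.List.pyRange 0 j0) (by
          intro j hj o
          rw [PySem.List.mem_pyRange_one] at hj
          exact hStep_id code c j hj.1 (by omega) (by omega) (by omega) o)]
    simp only [List.foldl_cons]
    have hmid : hStep code c (String.ofList [c]) j0
        = PySem.List.pyGetD (PySem.List.pyGetD code j0 []) 0 "" := by
      unfold hStep
      rw [if_pos]
      have : (65 + j0).toNat = c.toNat := by omega
      rw [this, Char.ofNat_toNat]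
    rw [hmid,
        foldl_hStep_id code c (PySem.List.pyRange (j0 + 1) 26) (by
          intro j hj o
          rw [PySem.List.mem_pyRange_one] at hj
          exact hStep_id code c j (by omega) hj.2 (by omega) (by omega) o)]
    rw [hgS, if_pos hU]
  · by_cases hL : PySem.Chars.islower c = true
    · obtain ⟨h1, h2⟩ := islower_bounds c hL
      set j0 : Int := (c.toNat : Int) - 97 with hj0
      rw [PySem.List.pyRange_one_append 0 j0 26 (by omega) (by omega),
          PySem.List.pyRange_one_cons (show j0 < 26 by omega), List.foldl_append,
          foldl_hStep_id code c (PySem.List.pyRange 0 j0) (by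
            intro j hj o
            rw [PySem.List.mem_pyRange_one] at hj
            exact hStep_id code c j hj.1 (by omega) (by omega) (by omega) o)]
      simp only [List.foldl_cons]
      have hmid : hStep code c (String.ofList [c]) j0
          = PySem.List.pyGetD (PySem.List.pyGetD code j0 []) 1 "" := by
        unfold hStep
        rw [if_neg, if_pos]
        · have : (97 + j0).toNat = c.toNat := by omega
          rw [this, Char.ofNat_toNat]
        · intro hc
          have := congrArg Char.toNat hc
          rw [char_toNat_ofNat _ (by omega)] at this
          omega
      rw [hmid,
          foldl_hStep_id code c (PySem.List.pyRange (j0 + 1) 26) (by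
            intro j hj o
            rw [PySem.List.mem_pyRange_one] at hj
            exact hStep_id code c j (by omega) hj.2 (by omega) (by omega) o)]
      rw [hgS, if_neg (by simpa using hU), if_pos hL]
    · rw [foldl_hStep_id code c _ (by
          intro j hj o
          rw [PySem.List.mem_pyRange_one] at hj
          refine hStep_id code c j hj.1 hj.2 ?_ ?_ o
          · intro hc
            rw [isupper_iff] at hU
            exact hU ⟨hc.1, by omega⟩
          · intro hc
            rw [islower_iff] at hL
            exact hL ⟨hc.1, by omega⟩)]
      rw [hgS, if_neg (by simpa using hU), if_neg (by simpa using hL)]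

lemma zipWith_map_right_same {α β : Type} (f : α → β → β) (g : α → β) :
    ∀ (xs : List α), List.zipWith f xs (xs.map g) = xs.map (fun c => f c (g c)) := by
  intro xs
  induction xs with
  | nil => simp
  | cons x xs ih => simp [ih]

lemma transformB_eq (original : String) (code : List (List String)) :
    transform_py_alt original code
      = PySem.Str.join "" (original.toList.map (fun c => gS code (String.ofList [c]))) := by
  unfold transform_py_alt
  congr 1
  have hpass : ∀ (out : List String) (j : Int), out.length = original.toList.length →
      bPass original.toList code out j
        = List.zipWith (fun c o' =>
            if c = Char.ofNat ((65 + j).toNat) then PySem.List.pyGetD (PySem.List.pyGetD code j []) 0 ""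
            else if c = Char.ofNat ((97 + j).toNat) then PySem.List.pyGetD (PySem.List.pyGetD code j []) 1 ""
            else o') original.toList out := by
    intro out j h
    have := pass_zip code j (Char.ofNat ((65 + j).toNat)) (Char.ofNat ((97 + j).toNat))
      original.toList [] out (by simpa using h)
    simpa [bPass] using this
  have hlen0 : (original.toList.map (fun c => String.ofList [c])).length = original.toList.length := by
    simp
  -- replace each bPass by its zipWith form along the fold, keeping the length invariant
  have hfold : ∀ (js : List Int) (out : List String), out.length = original.toList.length →
      js.foldl (bPass original.toList code) out
        = js.foldl (fun o j => List.zipWith (fun c o' =>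
            if c = Char.ofNat ((65 + j).toNat) then PySem.List.pyGetD (PySem.List.pyGetD code j []) 0 ""
            else if c = Char.ofNat ((97 + j).toNat) then PySem.List.pyGetD (PySem.List.pyGetD code j []) 1 ""
            else o') original.toList o) out := by
    intro js
    induction js with
    | nil => intro out _; rfl
    | cons j js ih =>
      intro out h
      simp only [List.foldl_cons]
      rw [hpass out j h, ih _ (by rw [List.length_zipWith]; omega)]
  rw [hfold _ _ hlen0, foldl_zip code _ _ _ hlen0, zipWith_map_right_same]
  apply List.map_congr_left
  intro c _
  exact pointwise code c

-- ===== VERDICT (by name: the statement is the Claim_ definition above) =====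
theorem transform_py_spec : Claim_equal_transform_py := by
  intro original code _ _
  unfold Spec_transform_py
  rw [transformA_eq, transformB_eq]
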